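-- pv_equiv track=rewrite | github.com/lydia-l3/data120-test-corrections | testcorrections.py | merge_protein_counts
-- ===== SOURCE A (Python) =====
-- def merge_protein_counts(counts_dict1, counts_dict2):
--     combined_dict = {}
--
--     # Use set union to get all unique keys from both dicts
--     union_keys = set(counts_dict1.keys()) | set(counts_dict2.keys())
--
--     # Use dict .get() to get the counts for keys from both dicts
--     for key in union_keys:
--         count1 = counts_dict1.get(key, 0) # default 0 if key not found
--         count2 = counts_dict2.get(key, 0)
--
--         # New dict stores tuples (with counts) as values
--         combined_dict[key] = ((count1, count2))
--
--     return combined_dict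
-- ===== SOURCE B (Python) =====
-- def merge_protein_counts(counts_dict1, counts_dict2):
--     # Override-merge: two independently comprehended tuple tables, the second
--     # (already holding final (c1, c2) pairs) overrides the first via {**, **}.
--     # No union set, no loop, no membership test, no mutable accumulator.
--     left = {key: (count, 0) for key, count in counts_dict1.items()}
--     right = {key: (counts_dict1.get(key, 0), count) for key, count in counts_dict2.items()}
--     return {**left, **right}
-- ===== Notes on version B (the rewrite author's own statement) =====
-- stated objective: alternative
-- what changed: B replaces A's union-of-keys set and per-key double .get() loop by an override-merge: it comprehends two independent tuple tables (left seeds (c1,0), right already holds the final (c1,c2) for every key of dict2) and combines them with {**left, **right}; there is no loop, no membership test and no mutable accumulator.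
import Mathlib
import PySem

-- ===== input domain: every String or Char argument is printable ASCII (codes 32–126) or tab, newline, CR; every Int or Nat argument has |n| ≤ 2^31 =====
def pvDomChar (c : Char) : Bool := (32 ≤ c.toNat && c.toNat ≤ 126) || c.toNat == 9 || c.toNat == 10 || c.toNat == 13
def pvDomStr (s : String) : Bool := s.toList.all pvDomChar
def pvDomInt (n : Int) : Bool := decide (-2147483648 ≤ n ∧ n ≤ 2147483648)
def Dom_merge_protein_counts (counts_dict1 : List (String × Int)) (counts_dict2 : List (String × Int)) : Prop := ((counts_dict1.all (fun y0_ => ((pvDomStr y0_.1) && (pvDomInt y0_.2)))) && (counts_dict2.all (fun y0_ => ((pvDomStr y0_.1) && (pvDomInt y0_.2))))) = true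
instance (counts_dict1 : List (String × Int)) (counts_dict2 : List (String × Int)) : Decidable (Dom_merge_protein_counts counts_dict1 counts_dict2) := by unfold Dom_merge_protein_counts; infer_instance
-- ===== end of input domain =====

-- B replaces A's union-of-keys loop with double .get() by an override-merge of two
-- independently built tuple tables ({**left, **right}); alternative decomposition, same cost.


-- ===== PORT A =====
-- A iterates the union SET of keys; Python's hash iteration order is not modelled, but the
-- returned dict is compared ignoring order, so building it in PySem.Set order is exact as a dict.
def merge_protein_counts (counts_dict1 : List (String × Int)) (counts_dict2 : List (String × Int)) : List (String × Int × Int) :=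
  let dict1 : PySem.Dict String Int := PySem.Dict.ofList counts_dict1
  let dict2 : PySem.Dict String Int := PySem.Dict.ofList counts_dict2
  let union_keys : PySem.Set String := PySem.Set.union (PySem.Set.ofList dict1.keys) dict2.keys
  (union_keys.foldl
    (fun (combined : PySem.Dict String (Int × Int)) key =>
      combined.insert key (dict1.getD key 0, dict2.getD key 0))
    PySem.Dict.empty).items

-- ===== PORT B =====
-- B: left/right dict comprehensions (ordered insert folds) merged by {**left, **right}
-- (= insert every item of right into left, left first, Python's override-merge order).
def merge_protein_counts_alt (counts_dict1 : List (String × Int)) (counts_dict2 : List (String × Int)) : List (String × Int × Int) :=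
  let dict1 : PySem.Dict String Int := PySem.Dict.ofList counts_dict1
  let left : PySem.Dict String (Int × Int) :=
    counts_dict1.foldl (fun c p => c.insert p.1 (p.2, 0)) PySem.Dict.empty
  let right : PySem.Dict String (Int × Int) :=
    counts_dict2.foldl (fun c p => c.insert p.1 (dict1.getD p.1 0, p.2)) PySem.Dict.empty
  (right.items.foldl (fun c p => c.insert p.1 p.2) left).items

-- ===== PRECONDITION & SPEC =====
def Spec_merge_protein_counts (counts_dict1 : List (String × Int)) (counts_dict2 : List (String × Int)) (out : List (String × Int × Int)) : Prop := out = merge_protein_counts_alt counts_dict1 counts_dict2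
instance (counts_dict1 : List (String × Int)) (counts_dict2 : List (String × Int)) (out : List (String × Int × Int)) : Decidable (Spec_merge_protein_counts counts_dict1 counts_dict2 out) := by unfold Spec_merge_protein_counts; infer_instance

-- ===== CLAIM (what is proved, stated in full; the proofs are below) =====
def Claim_equal_merge_protein_counts : Prop := ∀ (counts_dict1 : List (String × Int)) (counts_dict2 : List (String × Int)), Dom_merge_protein_counts counts_dict1 counts_dict2 → Spec_merge_protein_counts counts_dict1 counts_dict2 (merge_protein_counts counts_dict1 counts_dict2)

-- ===== LEMMAS AND PROOFS =====

-- value of the LAST pair with key k in l (Python dict-build "last wins"); proof-only helper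
def lastVal {β : Type} (l : List (String × β)) (k : String) : Option β :=
  match l with
  | [] => none
  | p :: r =>
    match lastVal r k with
    | some v => some v
    | none => if p.1 = k then some p.2 else none

theorem get?_foldl_ins {β : Type} (l : List (String × β)) (c : PySem.Dict String β) (k : String) :
    (l.foldl (fun d p => d.insert p.1 p.2) c).get? k =
      match lastVal l k with
      | some v => some v
      | none => c.get? k := by
  induction l generalizing c with
  | nil => simp [lastVal]
  | cons p r ih =>
    simp only [List.foldl_cons, ih, lastVal]
    cases lastVal r k with
    | some v => simp
    | none =>
      rw [PySem.Dict.get?_insert]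
      by_cases h : p.1 = k
      · simp [h]
      · simp [h, Ne.symm h]

theorem lastVal_some_mem {β : Type} (l : List (String × β)) (k : String) (v : β)
    (h : lastVal l k = some v) : (k, v) ∈ l := by
  induction l with
  | nil => simp [lastVal] at h
  | cons p r ih =>
    simp only [lastVal] at h
    cases hr : lastVal r k with
    | some w =>
      rw [hr] at h
      exact List.mem_cons_of_mem _ (ih (by rw [hr, ← Option.some_inj.mp h]))
    | none =>
      rw [hr] at h
      by_cases hk : p.1 = k
      · simp only [hk, if_true, Option.some_inj] at h
        exact List.mem_cons.mpr (Or.inl (by cases p; simp_all))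
      · simp [hk] at h

theorem lastVal_none_not_mem {β : Type} (l : List (String × β)) (k : String) (v : β)
    (h : lastVal l k = none) : (k, v) ∉ l := by
  induction l with
  | nil => simp
  | cons p r ih =>
    simp only [lastVal] at h
    cases hr : lastVal r k with
    | some w => rw [hr] at h; simp at h
    | none =>
      rw [hr] at h
      by_cases hk : p.1 = k
      · simp [hk] at h
      · intro hmem
        rcases List.mem_cons.mp hmem with heq | hmemr
        · exact hk (by rw [← heq])
        · exact ih hr hmemr

theorem lastVal_items_eq_get? {β : Type} (d : PySem.Dict String β) (hnd : d.keys.Nodup)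
    (k : String) : lastVal d.items k = d.get? k := by
  cases hv : lastVal d.items k with
  | some v => exact (PySem.Dict.get?_of_mem_items d (lastVal_some_mem _ _ _ hv) hnd).symm
  | none =>
    symm
    rw [PySem.Dict.get?_eq_none_iff_not_mem_keys]
    intro hk
    have : ∃ v, (k, v) ∈ d.items := by
      simp only [PySem.Dict.keys, List.mem_map] at hk
      obtain ⟨p, hp, hpk⟩ := hk
      exact ⟨p.2, by cases p; simpa [← hpk] using hp⟩
    obtain ⟨v, hv'⟩ := this
    exact lastVal_none_not_mem _ _ _ hv hv'

-- left comprehension: get? characterisation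
theorem get?_fold1 (l : List (String × Int)) (c : PySem.Dict String (Int × Int)) (k : String) :
    (l.foldl (fun d p => d.insert p.1 (p.2, 0)) c).get? k =
      match lastVal l k with
      | some v => some (v, 0)
      | none => c.get? k := by
  induction l generalizing c with
  | nil => simp [lastVal]
  | cons p r ih =>
    simp only [List.foldl_cons, ih, lastVal]
    cases lastVal r k with
    | some v => simp
    | none =>
      rw [PySem.Dict.get?_insert]
      by_cases h : p.1 = k
      · simp [h]
      · simp [h, Ne.symm h]

-- right comprehension: get? characterisation (value depends only on the key)
theorem get?_foldR (dict1 : PySem.Dict String Int) (l : List (String × Int))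
    (c : PySem.Dict String (Int × Int)) (k : String) :
    (l.foldl (fun d p => d.insert p.1 (dict1.getD p.1 0, p.2)) c).get? k =
      match lastVal l k with
      | some v => some (dict1.getD k 0, v)
      | none => c.get? k := by
  induction l generalizing c with
  | nil => simp [lastVal]
  | cons p r ih =>
    simp only [List.foldl_cons, ih, lastVal]
    cases lastVal r k with
    | some v => simp
    | none =>
      rw [PySem.Dict.get?_insert]
      by_cases h : p.1 = k
      · simp [h]
      · simp [h, Ne.symm h]

theorem getD_ofList (l : List (String × Int)) (k : String) :
    (PySem.Dict.ofList l).getD k 0 = (lastVal l k).getD 0 := by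
  rw [PySem.Dict.getD_eq_get?_getD]
  show ((l.foldl (fun d p => d.insert p.1 p.2) PySem.Dict.empty).get? k).getD 0 = _
  rw [get?_foldl_ins]
  cases lastVal l k <;> simp [PySem.Dict.get?_empty]

theorem update_ofList_right (s : PySem.Set String) (xs : List String) :
    s.update (PySem.Set.ofList xs) = s.update xs := by
  rw [PySem.Set.update_eq_append_filter, PySem.Set.update_eq_append_filter,
    PySem.Set.ofList_ofList]

-- ===== VERDICT (by name: the statement is the Claim_ definition above) =====
theorem merge_protein_counts_spec : Claim_equal_merge_protein_counts := by
  intro d1 d2 _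
  unfold Spec_merge_protein_counts merge_protein_counts merge_protein_counts_alt
  simp only []
  set dict1 : PySem.Dict String Int := PySem.Dict.ofList d1 with hdict1
  set dict2 : PySem.Dict String Int := PySem.Dict.ofList d2 with hdict2
  have hk1 : dict1.keys = PySem.Set.ofList (d1.map (·.1)) := by
    rw [hdict1]
    show (d1.foldl (fun d p => d.insert p.1 p.2) PySem.Dict.empty).keys = _
    rw [PySem.Dict.keys_foldl_insert_key d1 (·.1) (fun _ p => p.2)]
    simp [PySem.Dict.keys_empty, PySem.Set.update_nil_left]
  have hk2 : dict2.keys = PySem.Set.ofList (d2.map (·.1)) := by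
    rw [hdict2]
    show (d2.foldl (fun d p => d.insert p.1 p.2) PySem.Dict.empty).keys = _
    rw [PySem.Dict.keys_foldl_insert_key d2 (·.1) (fun _ p => p.2)]
    simp [PySem.Dict.keys_empty, PySem.Set.update_nil_left]
  -- B's dicts
  set left : PySem.Dict String (Int × Int) :=
    d1.foldl (fun c p => c.insert p.1 (p.2, 0)) PySem.Dict.empty with hleft
  set right : PySem.Dict String (Int × Int) :=
    d2.foldl (fun c p => c.insert p.1 (dict1.getD p.1 0, p.2)) PySem.Dict.empty with hright
  set combined : PySem.Dict String (Int × Int) :=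
    right.items.foldl (fun c p => c.insert p.1 p.2) left with hcombined
  -- key lists
  have hlk : left.keys = PySem.Set.ofList (d1.map (·.1)) := by
    rw [hleft, PySem.Dict.keys_foldl_insert_key d1 (·.1) (fun _ p => (p.2, 0))]
    simp [PySem.Dict.keys_empty, PySem.Set.update_nil_left]
  have hrk : right.keys = PySem.Set.ofList (d2.map (·.1)) := by
    rw [hright, PySem.Dict.keys_foldl_insert_key d2 (·.1) (fun c p => (dict1.getD p.1 0, p.2))]
    simp [PySem.Dict.keys_empty, PySem.Set.update_nil_left]
  have hnodupL : left.keys.Nodup := by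
    rw [hlk]; exact PySem.Set.nodup_ofList _
  have hnodupR : right.keys.Nodup := by
    rw [hrk]; exact PySem.Set.nodup_ofList _
  have hck : combined.keys = PySem.Set.update (PySem.Set.ofList (d1.map (·.1))) (d2.map (·.1)) := by
    rw [hcombined, PySem.Dict.keys_foldl_insert_key right.items (·.1) (fun _ p => p.2), hlk]
    have : right.items.map (·.1) = right.keys := rfl
    rw [this, hrk, update_ofList_right]
  have hU : PySem.Set.union (PySem.Set.ofList dict1.keys) dict2.keys = combined.keys := by
    rw [hk1, hk2, PySem.Set.ofList_ofList, hck]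
    show PySem.Set.update _ _ = _
    rw [update_ofList_right]
  -- pointwise values agree
  have hval : ∀ k, combined.getD k (0, 0) = (dict1.getD k 0, dict2.getD k 0) := by
    intro k
    have hg1 : dict1.getD k 0 = (lastVal d1 k).getD 0 := by rw [hdict1, getD_ofList]
    rw [PySem.Dict.getD_eq_get?_getD, hcombined, get?_foldl_ins,
      lastVal_items_eq_get? right hnodupR, hright, get?_foldR, hg1, hdict2, getD_ofList]
    cases h2 : lastVal d2 k with
    | some v2 => simp
    | none =>
      rw [hleft, get?_fold1]
      cases h1 : lastVal d1 k <;> simp [PySem.Dict.get?_empty]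
  -- assemble
  have hnodupU : (PySem.Set.union (PySem.Set.ofList dict1.keys) dict2.keys).Nodup := by
    exact PySem.Set.nodup_union _ _ (PySem.Set.nodup_ofList _)
  have hnodupC : combined.keys.Nodup := by
    rw [hcombined]
    exact PySem.Dict.nodup_keys_foldl_insert_key right.items (fun p => p.1) (fun _ p => p.2)
      left hnodupL
  have hA := PySem.Dict.items_foldl_insert_fresh
    (l := PySem.Set.union (PySem.Set.ofList dict1.keys) dict2.keys)
    (k := fun key => key) (v := fun key => (dict1.getD key 0, dict2.getD key 0))
    PySem.Dict.empty (fun _ _ => PySem.Dict.contains_empty _) (by simpa using hnodupU)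
  simp only [] at hA
  rw [PySem.Dict.items_eq_map_keys combined hnodupC (0, 0), hA]
  simp only [PySem.Dict.empty, List.nil_append]
  rw [hU]
  exact List.map_congr_left (fun k _ => by rw [hval k])
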